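-- pv_equiv track=rewrite | github.com/taehyungz/Algorithm | programmers/level3/징검다리 건너기.py | solution
-- ===== SOURCE A (Python) =====
-- def solution(stones, k):
--     left, right = 1, max(stones)
--     answer = 1
--     while left <= right:
--         mid = left + (right-left) // 2
--         zero_cnt = 0
--
--         for i in stones:
--             if i < mid: zero_cnt += 1
--             else: zero_cnt = 0
--             if zero_cnt == k: break
--
--         if zero_cnt < k:
--             left = mid + 1
--             answer = max(answer, mid)
--         else:
--             right = mid - 1
--     return answer
-- ===== SOURCE B (Python) =====
-- def solution(stones, k):
--     # Direct closed-form: the answer is the minimum, over all windows of k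
--     # consecutive stones, of the maximum stone in the window (floored at 1).
--     if k <= 0:
--         return 1
--     n = len(stones)
--     if k > n:
--         return max(1, max(stones))
--     best = None
--     for i in range(n - k + 1):
--         w = max(stones[i:i + k])
--         if best is None or w < best:
--             best = w
--     return max(1, best)
-- ===== Notes on version B (the rewrite author's own statement) =====
-- stated objective: alternative
-- what changed: Replaces the binary search over the answer with a run-length feasibility scan by a direct single pass computing the minimum over all length-k windows of the window maximum (floored at 1).
-- outside the precondition, e.g. on solution([], 3): A raises ValueError, B raises ValueError
import Mathlib
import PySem

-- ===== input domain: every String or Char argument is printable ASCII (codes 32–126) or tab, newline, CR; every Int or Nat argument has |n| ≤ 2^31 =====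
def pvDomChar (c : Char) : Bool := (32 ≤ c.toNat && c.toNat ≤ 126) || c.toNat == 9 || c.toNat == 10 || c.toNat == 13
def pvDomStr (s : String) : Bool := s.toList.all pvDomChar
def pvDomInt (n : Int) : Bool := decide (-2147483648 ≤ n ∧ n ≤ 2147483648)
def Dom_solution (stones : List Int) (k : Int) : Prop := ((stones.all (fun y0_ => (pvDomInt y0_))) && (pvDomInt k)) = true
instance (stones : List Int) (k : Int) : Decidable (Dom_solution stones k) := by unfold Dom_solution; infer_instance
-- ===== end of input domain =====

-- B replaces A's binary search over the answer by a direct pass computing the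
-- minimum over all length-k windows of the window maximum (floored at 1); objective: alternative.


-- ===== PORT A =====
-- the inner 'for i in stones' loop: run length of consecutive stones < mid, breaking at k
def solGo (mid k : Int) : List Int → Int → Int
  | [], z => z
  | i :: rest, z =>
    let z' := if i < mid then z + 1 else 0
    if z' = k then z' else solGo mid k rest z'

-- the 'while left <= right' loop
def solLoop (stones : List Int) (k : Int) (left right answer : Int) : Int :=
  if left ≤ right then
    let mid := left + PySem.Int.floordiv (right - left) 2
    let zero_cnt := solGo mid k stones 0
    if zero_cnt < k then solLoop stones k (mid + 1) right (max answer mid)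
    else solLoop stones k left (mid - 1) answer
  else answer
termination_by (right + 1 - left).toNat
decreasing_by
  all_goals
    have hd : PySem.Int.floordiv (right - left) 2 = (right - left) / 2 :=
      PySem.Int.floordiv_eq_ediv_of_pos (by norm_num)
    simp only [hd] at *
    omega

def solution (stones : List Int) (k : Int) : Int :=
  match PySem.List.max? stones (fun y => y) with
  | none => 0      -- Python: max([]) raises ValueError; excluded by Pre_solution
  | some M => solLoop stones k 1 M 1

-- ===== PORT B =====
def solution_alt (stones : List Int) (k : Int) : Int :=
  if k ≤ 0 then 1
  else
    let n : Int := stones.length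
    if k > n then max 1 ((PySem.List.max? stones (fun y => y)).getD 0)  -- max(stones); nonempty under Pre_
    else
      let best := (PySem.List.pyRange 0 (n - k + 1) 1).foldl (fun best i =>
        let w := (PySem.List.max? (PySem.List.slice stones (some i) (some (i + k))) (fun y => y)).getD 0
        match best with
        | none => some w
        | some b => if w < b then some w else some b) none
      match best with
      | some b => max 1 b
      | none => 1      -- unreachable: the range is nonempty since 1 ≤ k ≤ n

-- ===== PRECONDITION & SPEC =====
-- Pre_ excludes only the empty list, on which Python's max(stones) raises ValueError in A (and in B for k > 0).
def Pre_solution (stones : List Int) (k : Int) : Prop := stones ≠ []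
instance (stones : List Int) (k : Int) : Decidable (Pre_solution stones k) := by unfold Pre_solution; infer_instance
def pvWitness_solution : List Int × Int := ([2, 4, 5, 3, 2, 1, 4, 2, 5, 1], 3)
def Spec_solution (stones : List Int) (k : Int) (out : Int) : Prop := out = solution_alt stones k
instance (stones : List Int) (k : Int) (out : Int) : Decidable (Spec_solution stones k out) := by unfold Spec_solution; infer_instance

-- ===== CLAIM (what is proved, stated in full; the proofs are below) =====
def Claim_equal_solution : Prop := ∀ (stones : List Int) (k : Int), Dom_solution stones k → Pre_solution stones k → Spec_solution stones k (solution stones k)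

-- ===== LEMMAS AND PROOFS =====

-- window i of width kn, and its maximum (as the ports compute it)
def pvWin (stones : List Int) (kn i : Nat) : List Int := (stones.drop i).take kn

def pvWmax (stones : List Int) (kn i : Nat) : Int :=
  (PySem.List.max? (pvWin stones kn i) (fun y => y)).getD 0

-- the value B computes for index i (the body of B's fold)
def bVal (stones : List Int) (k i : Int) : Int :=
  (PySem.List.max? (PySem.List.slice stones (some i) (some (i + k))) (fun y => y)).getD 0

-- "the run of (< mid) stones starting at the head, together with carry z, reaches k"
def Carry (mid k z : Int) (l : List Int) : Prop :=
  (k - z).toNat ≤ l.length ∧ ∀ x ∈ l.take (k - z).toNat, x < mid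

-- "some window of width k starting at index ≥ 1 is entirely < mid"
def WinBad (mid k : Int) (l : List Int) : Prop :=
  ∃ i : Nat, 1 ≤ i ∧ i + k.toNat ≤ l.length ∧ ∀ x ∈ (l.drop i).take k.toNat, x < mid

theorem solGo_bounds (mid k : Int) :
    ∀ (l : List Int) (z : Int), 0 ≤ z → z < k → 0 ≤ solGo mid k l z ∧ solGo mid k l z ≤ k := by
  intro l
  induction l with
  | nil => intro z h0 hk; simp [solGo]; omega
  | cons a l ih =>
    intro z h0 hk
    simp only [solGo]
    by_cases ha : a < mid <;> simp only [ha, if_true, if_false] <;> split_ifs with he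
    · omega
    · exact ih (z + 1) (by omega) (by omega)
    · omega
    · exact ih 0 (by omega) (by omega)

theorem solGo_nonpos (mid k : Int) (hk : k ≤ 0) :
    ∀ (l : List Int) (z : Int), 0 ≤ z → k ≤ solGo mid k l z := by
  intro l
  induction l with
  | nil => intro z h0; simp [solGo]; omega
  | cons a l ih =>
    intro z h0
    simp only [solGo]
    by_cases ha : a < mid <;> simp only [ha, if_true, if_false] <;> split_ifs with he
    · omega
    · exact ih (z + 1) (by omega)
    · omega
    · exact ih 0 (by omega)

theorem solGo_short (mid k : Int) :
    ∀ (l : List Int) (z : Int), 0 ≤ z → z + l.length < k → solGo mid k l z < k := by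
  intro l
  induction l with
  | nil => intro z h0 hs; simp only [List.length_nil] at hs; simpa [solGo] using (by omega : z < k)
  | cons a l ih =>
    intro z h0 hs
    simp only [List.length_cons] at hs
    simp only [solGo]
    by_cases ha : a < mid <;> simp only [ha, if_true, if_false] <;> split_ifs with he
    · omega
    · exact ih (z + 1) (by omega) (by omega)
    · omega
    · exact ih 0 (by omega) (by omega)

theorem winbad_cons (mid k : Int) (a : Int) (l : List Int) :
    WinBad mid k (a :: l) ↔
      ((k.toNat ≤ l.length ∧ ∀ x ∈ l.take k.toNat, x < mid) ∨ WinBad mid k l) := by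
  constructor
  · rintro ⟨i, hi1, hile, hall⟩
    obtain ⟨j, rfl⟩ : ∃ j, i = j + 1 := ⟨i - 1, by omega⟩
    simp only [List.length_cons, List.drop_succ_cons] at hile hall
    rcases Nat.eq_zero_or_pos j with rfl | hj
    · exact Or.inl ⟨by omega, by simpa using hall⟩
    · exact Or.inr ⟨j, hj, by omega, hall⟩
  · rintro (⟨hle, hall⟩ | ⟨j, hj1, hjle, hall⟩)
    · exact ⟨1, le_refl 1, by simp; omega, by simpa using hall⟩
    · exact ⟨j + 1, by omega, by simp; omega, by simpa using hall⟩

theorem solGo_eq_iff (mid k : Int) (hk : 1 ≤ k) :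
    ∀ (l : List Int) (z : Int), 0 ≤ z → z < k →
      (solGo mid k l z = k ↔ Carry mid k z l ∨ WinBad mid k l) := by
  intro l
  induction l with
  | nil =>
    intro z h0 hz
    simp only [solGo, Carry, WinBad, List.length_nil]
    constructor
    · intro h; omega
    · rintro (⟨h1, _⟩ | ⟨i, hi1, hile, _⟩) <;> omega
  | cons a l ih =>
    intro z h0 hz
    simp only [solGo]
    by_cases ha : a < mid
    · simp only [ha, if_true]
      by_cases he : z + 1 = k
      · rw [if_pos he]
        constructor
        · intro _
          refine Or.inl ⟨?_, ?_⟩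
          · simp only [List.length_cons]; omega
          · intro x hx
            have : (k - z).toNat = 1 := by omega
            rw [this] at hx
            simp only [List.take_succ_cons, List.take_zero, List.mem_singleton] at hx
            subst hx; exact ha
        · intro _; exact he
      · simp only [if_neg he]
        rw [ih (z + 1) (by omega) (by omega)]
        have hcar : Carry mid k z (a :: l) ↔ Carry mid k (z + 1) l := by
          unfold Carry
          have ht : (k - z).toNat = (k - (z + 1)).toNat + 1 := by omega
          rw [ht]
          simp only [List.take_succ_cons, List.length_cons, List.mem_cons]
          constructor
          · rintro ⟨h1, h2⟩
            exact ⟨by omega, fun x hx => h2 x (Or.inr hx)⟩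
          · rintro ⟨h1, h2⟩
            refine ⟨by omega, ?_⟩
            rintro x (rfl | hx)
            · exact ha
            · exact h2 x hx
        have hwin0 : (k.toNat ≤ l.length ∧ ∀ x ∈ l.take k.toNat, x < mid) →
            Carry mid k (z + 1) l := by
          rintro ⟨h1, h2⟩
          refine ⟨by omega, ?_⟩
          intro x hx
          have hsub : l.take (k - (z + 1)).toNat = (l.take k.toNat).take (k - (z + 1)).toNat := by
            rw [List.take_take]; congr 1; omega
          rw [hsub] at hx
          exact h2 x (List.mem_of_mem_take hx)
        rw [winbad_cons, hcar]
        constructor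
        · rintro (h | h)
          · exact Or.inl h
          · exact Or.inr (Or.inr h)
        · rintro (h | h | h)
          · exact Or.inl h
          · exact Or.inl (hwin0 h)
          · exact Or.inr h
    · simp only [ha, if_false, if_neg (by omega : ¬ (0 : Int) = k)]
      rw [ih 0 (le_refl 0) (by omega)]
      have hcar : ¬ Carry mid k z (a :: l) := by
        rintro ⟨h1, h2⟩
        have hmem : a ∈ (a :: l).take (k - z).toNat := by
          have ht : (k - z).toNat = ((k - z).toNat - 1) + 1 := by omega
          rw [ht]
          simp
        exact absurd (h2 a hmem) (by omega)
      have hcar0 : Carry mid k 0 l ↔ (k.toNat ≤ l.length ∧ ∀ x ∈ l.take k.toNat, x < mid) := by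
        unfold Carry
        have : (k - 0).toNat = k.toNat := by omega
        rw [this]
      rw [winbad_cons, hcar0]
      tauto

theorem solGo_top (mid k : Int) (hk : 1 ≤ k) (l : List Int) :
    (solGo mid k l 0 < k ↔
      ∀ i : Nat, i + k.toNat ≤ l.length → ∃ x ∈ pvWin l k.toNat i, mid ≤ x) := by
  have hb := solGo_bounds mid k l 0 (le_refl 0) (by omega)
  have hiff := solGo_eq_iff mid k hk l 0 (le_refl 0) (by omega)
  constructor
  · intro hlt i hile
    by_contra hno
    simp only [not_exists, not_and, not_le] at hno
    have hbad : Carry mid k 0 l ∨ WinBad mid k l := by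
      rcases Nat.eq_zero_or_pos i with rfl | hi
      · refine Or.inl ⟨by simpa using (by omega : (k - 0).toNat ≤ l.length), ?_⟩
        intro x hx
        have : x ∈ pvWin l k.toNat 0 := by
          simpa [pvWin] using (by simpa [show (k - 0).toNat = k.toNat by omega] using hx :
            x ∈ l.take k.toNat)
        exact lt_of_not_ge fun hge => absurd hge (by simpa using hno x this)
      · refine Or.inr ⟨i, hi, hile, ?_⟩
        intro x hx
        exact lt_of_not_ge fun hge => absurd hge (by simpa using hno x (by simpa [pvWin] using hx))
    exact absurd (hiff.2 hbad) (by omega)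
  · intro hall
    rcases lt_or_eq_of_le hb.2 with hlt | heq
    · exact hlt
    · exfalso
      rcases hiff.1 heq with ⟨h1, h2⟩ | ⟨i, _, hile, h2⟩
      · obtain ⟨x, hx, hge⟩ := hall 0 (by simpa using (by omega : k.toNat ≤ l.length))
        have : x < mid := h2 x (by simpa [pvWin, show (k - 0).toNat = k.toNat by omega] using hx)
        omega
      · obtain ⟨x, hx, hge⟩ := hall i hile
        have : x < mid := h2 x (by simpa [pvWin] using hx)
        omega

-- B's fold (running minimum kept as an Option) computes a minimum of the bVal's
theorem foldmin (stones : List Int) (k : Int) :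
    ∀ (l : List Int) (b : Int),
      ∃ F, l.foldl (fun best i =>
          let w := bVal stones k i
          match best with
          | none => some w
          | some c => if w < c then some w else some c) (some b) = some F ∧
        (F = b ∨ ∃ i ∈ l, F = bVal stones k i) ∧ F ≤ b ∧ ∀ i ∈ l, F ≤ bVal stones k i := by
  intro l
  induction l with
  | nil => intro b; exact ⟨b, rfl, Or.inl rfl, le_refl b, by simp⟩
  | cons a l ih =>
    intro b
    simp only [List.foldl_cons]
    by_cases hw : bVal stones k a < b
    · obtain ⟨F, hF, hor, hle, hall⟩ := ih (bVal stones k a)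
      refine ⟨F, by simpa [hw] using hF, ?_, by omega, ?_⟩
      · rcases hor with h | ⟨i, hi, hv⟩
        · exact Or.inr ⟨a, by simp, h⟩
        · exact Or.inr ⟨i, by simp [hi], hv⟩
      · intro i hi
        rcases List.mem_cons.1 hi with rfl | hi
        · exact hle
        · exact hall i hi
    · obtain ⟨F, hF, hor, hle, hall⟩ := ih b
      refine ⟨F, by simpa [hw] using hF, ?_, hle, ?_⟩
      · rcases hor with h | ⟨i, hi, hv⟩
        · exact Or.inl h
        · exact Or.inr ⟨i, by simp [hi], hv⟩
      · intro i hi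
        rcases List.mem_cons.1 hi with rfl | hi
        · omega
        · exact hall i hi

theorem foldmin0 (stones : List Int) (k a : Int) (l : List Int) :
    ∃ F, ((a :: l).foldl (fun best i =>
        let w := bVal stones k i
        match best with
        | none => some w
        | some c => if w < c then some w else some c) none) = some F ∧
      (F = bVal stones k a ∨ ∃ i ∈ l, F = bVal stones k i) ∧
      F ≤ bVal stones k a ∧ ∀ i ∈ l, F ≤ bVal stones k i := by
  simp only [List.foldl_cons]
  exact foldmin stones k l (bVal stones k a)

theorem pvWmax_spec (stones : List Int) (kn i : Nat) (hkn : 1 ≤ kn)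
    (hile : i + kn ≤ stones.length) :
    pvWmax stones kn i ∈ pvWin stones kn i ∧ ∀ x ∈ pvWin stones kn i, x ≤ pvWmax stones kn i := by
  have hne : pvWin stones kn i ≠ [] := by
    unfold pvWin
    intro he
    have := congrArg List.length he
    simp only [List.length_take, List.length_drop, List.length_nil] at this
    omega
  cases hmax : PySem.List.max? (pvWin stones kn i) (fun y => y) with
  | none => exact absurd ((PySem.List.max?_eq_none_iff _ _).1 hmax) hne
  | some m =>
    have h1 := PySem.List.max?_mem hmax
    have h2 := PySem.List.max?_isMax hmax
    unfold pvWmax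
    rw [hmax]
    exact ⟨h1, fun x hx => h2 x hx⟩

theorem bVal_eq (stones : List Int) (k i : Int) (h0 : 0 ≤ i) (hk : 0 ≤ k) :
    bVal stones k i = pvWmax stones k.toNat i.toNat := by
  unfold bVal pvWmax pvWin
  rw [PySem.List.slice_toNat stones h0 (by omega : (0:Int) ≤ i + k),
    show (i + k).toNat - i.toNat = k.toNat from by omega]

-- binary search loop: generic correctness against a feasibility threshold F
theorem solLoop_eq (stones : List Int) (k F : Int)
    (hch : ∀ mid, solGo mid k stones 0 < k ↔ mid ≤ F) :
    ∀ (left right answer : Int), 1 ≤ left → F ≤ right → (left = 1 ∨ left - 1 ≤ F) →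
      answer = max 1 (left - 1) →
      solLoop stones k left right answer = max 1 F := by
  have main : ∀ (m : Nat) (left right answer : Int), (right + 1 - left).toNat ≤ m →
      1 ≤ left → F ≤ right → (left = 1 ∨ left - 1 ≤ F) → answer = max 1 (left - 1) →
      solLoop stones k left right answer = max 1 F := by
    intro m
    induction m with
    | zero =>
      intro l r a hm h1 h2 h3 h4
      rw [solLoop, if_neg (by omega : ¬ l ≤ r)]
      omega
    | succ m ih =>
      intro l r a hm h1 h2 h3 h4
      by_cases hlr : l ≤ r
      · rw [solLoop, if_pos hlr]
        have hd : PySem.Int.floordiv (r - l) 2 = (r - l) / 2 :=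
          PySem.Int.floordiv_eq_ediv_of_pos (by norm_num)
        dsimp only
        by_cases hck : solGo (l + PySem.Int.floordiv (r - l) 2) k stones 0 < k
        · rw [if_pos hck]
          have hmid : l + PySem.Int.floordiv (r - l) 2 ≤ F := (hch _).1 hck
          refine ih _ _ _ (by rw [hd] at hmid ⊢; omega) (by rw [hd] at hmid ⊢; omega) h2
            (Or.inr (by omega)) (by rw [hd] at hmid ⊢; omega)
        · rw [if_neg hck]
          have hmid : F < l + PySem.Int.floordiv (r - l) 2 := by
            by_contra hge
            exact hck ((hch _).2 (by omega))
          refine ih _ _ _ (by rw [hd] at hmid ⊢; omega) h1 (by omega) h3 h4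
      · rw [solLoop, if_neg hlr]
        omega
  exact fun left right answer => main (right + 1 - left).toNat left right answer (le_refl _)

-- if the check never passes, the loop returns its initial answer
theorem solLoop_allfail (stones : List Int) (k : Int)
    (hch : ∀ mid, ¬ (solGo mid k stones 0 < k)) :
    ∀ (left right answer : Int), solLoop stones k left right answer = answer := by
  have main : ∀ (m : Nat) (left right answer : Int), (right + 1 - left).toNat ≤ m →
      solLoop stones k left right answer = answer := by
    intro m
    induction m with
    | zero =>
      intro l r a hm
      rw [solLoop, if_neg (by omega : ¬ l ≤ r)]
    | succ m ih =>
      intro l r a hm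
      by_cases hlr : l ≤ r
      · rw [solLoop, if_pos hlr]
        have hd : PySem.Int.floordiv (r - l) 2 = (r - l) / 2 :=
          PySem.Int.floordiv_eq_ediv_of_pos (by norm_num)
        dsimp only
        rw [if_neg (hch _)]
        exact ih _ _ _ (by rw [hd]; omega)
      · rw [solLoop, if_neg hlr]
  exact fun left right answer => main (right + 1 - left).toNat left right answer (le_refl _)

-- if the check always passes, the loop converges to the right end (floored at 1)
theorem solLoop_allpass (stones : List Int) (k : Int)
    (hch : ∀ mid, solGo mid k stones 0 < k) :
    ∀ (left right answer : Int), 1 ≤ left → (left = 1 ∨ left - 1 ≤ right) →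
      answer = max 1 (left - 1) →
      solLoop stones k left right answer = max 1 right := by
  have main : ∀ (m : Nat) (left right answer : Int), (right + 1 - left).toNat ≤ m →
      1 ≤ left → (left = 1 ∨ left - 1 ≤ right) → answer = max 1 (left - 1) →
      solLoop stones k left right answer = max 1 right := by
    intro m
    induction m with
    | zero =>
      intro l r a hm h1 h3 h4
      rw [solLoop, if_neg (by omega : ¬ l ≤ r)]
      omega
    | succ m ih =>
      intro l r a hm h1 h3 h4
      by_cases hlr : l ≤ r
      · rw [solLoop, if_pos hlr]
        have hd : PySem.Int.floordiv (r - l) 2 = (r - l) / 2 :=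
          PySem.Int.floordiv_eq_ediv_of_pos (by norm_num)
        dsimp only
        rw [if_pos (hch _)]
        refine ih _ _ _ (by rw [hd]; omega) (by rw [hd]; omega)
          (Or.inr (by rw [hd]; omega)) (by rw [hd]; omega)
      · rw [solLoop, if_neg hlr]
        omega
  exact fun left right answer => main (right + 1 - left).toNat left right answer (le_refl _)

-- ===== VERDICT (by name: the statement is the Claim_ definition above) =====
theorem solution_spec : Claim_equal_solution := by
  intro stones k _ hpre
  unfold Spec_solution
  cases hM : PySem.List.max? stones (fun y => y) with
  | none => exact absurd ((PySem.List.max?_eq_none_iff _ _).1 hM) hpre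
  | some M =>
    simp only [solution, hM]
    by_cases hk0 : k ≤ 0
    · have hB : solution_alt stones k = 1 := by
        rw [solution_alt, if_pos hk0]
      rw [hB]
      exact solLoop_allfail stones k
        (fun mid h => absurd h (by have := solGo_nonpos mid k hk0 stones 0 (le_refl 0); omega))
        1 M 1
    · by_cases hkn : (stones.length : Int) < k
      · have hB : solution_alt stones k = max 1 M := by
          rw [solution_alt, if_neg hk0]
          dsimp only
          rw [if_pos hkn]
          simp [hM]
        rw [hB]
        exact solLoop_allpass stones k
          (fun mid => solGo_short mid k stones 0 (le_refl 0) (by omega))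
          1 M 1 (le_refl 1) (Or.inl rfl) (by omega)
      · -- main case : 1 ≤ k ≤ len
        have hN : (0:Int) < (stones.length : Int) - k + 1 := by omega
        obtain ⟨F, hF, hor, hle, hall⟩ :=
          foldmin0 stones k 0 (PySem.List.pyRange 1 ((stones.length : Int) - k + 1) 1)
        have hFle : ∀ i : Int, 0 ≤ i → i < (stones.length : Int) - k + 1 →
            F ≤ bVal stones k i := by
          intro i h0 hiN
          rcases eq_or_lt_of_le h0 with rfl | h1
          · exact hle
          · exact hall i (PySem.List.mem_pyRange_one.2 ⟨by omega, hiN⟩)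
        have hFeq : ∃ i : Int, 0 ≤ i ∧ i < (stones.length : Int) - k + 1 ∧
            F = bVal stones k i := by
          rcases hor with h | ⟨i, hi, hv⟩
          · exact ⟨0, le_refl 0, by omega, h⟩
          · have := PySem.List.mem_pyRange_one.1 hi
            exact ⟨i, by omega, by omega, hv⟩
        have hch : ∀ mid, solGo mid k stones 0 < k ↔ mid ≤ F := by
          intro mid
          rw [solGo_top mid k (by omega) stones]
          constructor
          · intro hallwin
            obtain ⟨i, h0, hiN, hFv⟩ := hFeq
            have hile : i.toNat + k.toNat ≤ stones.length := by omega
            have hspec := pvWmax_spec stones k.toNat i.toNat (by omega) hile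
            obtain ⟨x, hxw, hxm⟩ := hallwin i.toNat hile
            have hxle := hspec.2 x hxw
            rw [hFv, bVal_eq stones k i h0 (by omega)]
            omega
          · intro hmF i hile
            have hiN : (i : Int) < (stones.length : Int) - k + 1 := by omega
            have hFi := hFle (i : Int) (by omega) hiN
            rw [bVal_eq stones k (i : Int) (by omega) (by omega)] at hFi
            simp only [Int.toNat_natCast] at hFi
            exact ⟨pvWmax stones k.toNat i,
              (pvWmax_spec stones k.toNat i (by omega) hile).1, by omega⟩
        have hFM : F ≤ M := by
          obtain ⟨i, h0, hiN, hFv⟩ := hFeq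
          have hile : i.toNat + k.toNat ≤ stones.length := by omega
          have hspec := pvWmax_spec stones k.toNat i.toNat (by omega) hile
          have hmem : pvWmax stones k.toNat i.toNat ∈ stones :=
            List.mem_of_mem_drop (List.mem_of_mem_take hspec.1)
          have := PySem.List.max?_isMax hM _ hmem
          rw [hFv, bVal_eq stones k i h0 (by omega)]
          exact this
        have hB : solution_alt stones k = max 1 F := by
          rw [solution_alt, if_neg hk0]
          dsimp only
          rw [if_neg (by omega : ¬ ((stones.length : Int) < k))]
          rw [PySem.List.pyRange_one_cons (by omega : (0:Int) < (stones.length : Int) - k + 1)]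
          have hfun : (fun (best : Option Int) (i : Int) =>
              let w := (PySem.List.max? (PySem.List.slice stones (some i) (some (i + k)))
                (fun y => y)).getD 0
              match best with
              | none => some w
              | some b => if w < b then some w else some b) = (fun best i =>
              let w := bVal stones k i
              match best with
              | none => some w
              | some c => if w < c then some w else some c) := rfl
          rw [hfun, show (0:Int) + 1 = 1 from rfl, hF]
        rw [hB]
        exact solLoop_eq stones k F hch 1 M 1 (le_refl 1) hFM (Or.inl rfl) (by omega)
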